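-- pv_equiv track=rewrite | github.com/yanzhh/HGERE | run_pruner.py | _exact_boundaries
-- ===== SOURCE A (Python) =====
-- def _exact_boundaries(indexs, sent_lens, batch_m2s):
--     sent_lens_simple = []
--     indexs_simple = []
--     batch_m2s_simple = []
--     ranges = []
--     current_len = 1
--     current_sent_index = indexs[0]
--     sent_lens_simple.append(int(sent_lens[0]))
--     indexs_simple.append(indexs[0])
--     batch_m2s_simple.append(batch_m2s[0])
--     for i in range(1, len(indexs)):
--         index = indexs[i]
--         if current_sent_index == index:
--             current_len += 1
--             batch_m2s_simple[-1] += batch_m2s[i]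
--         else:
--             current_sent_index = index
--             ranges.append(current_len)
--             current_len = 1
--             sent_lens_simple.append(int(sent_lens[i]))
--             indexs_simple.append(indexs[i])
--             batch_m2s_simple.append(batch_m2s[i])
--     ranges.append(current_len)
--
--     return ranges, sent_lens_simple, indexs_simple, batch_m2s_simple
-- ===== SOURCE B (Python) =====
-- def _exact_boundaries(indexs, sent_lens, batch_m2s):
--     n = len(indexs)
--     starts = [i for i in range(n) if i == 0 or indexs[i] != indexs[i - 1]]
--     ends = starts[1:] + [n]
--     ranges = [e - s for s, e in zip(starts, ends)]
--     sent_lens_simple = [int(sent_lens[s]) for s in starts]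
--     indexs_simple = [indexs[s] for s in starts]
--     batch_m2s_simple = []
--     for s, e in zip(starts, ends):
--         acc = batch_m2s[s]
--         for j in range(s + 1, e):
--             acc += batch_m2s[j]
--         batch_m2s_simple.append(acc)
--     return ranges, sent_lens_simple, indexs_simple, batch_m2s_simple
-- ===== Notes on version B (the rewrite author's own statement) =====
-- stated objective: alternative
-- what changed: Replaces A's single left-to-right scan with carried run state (current_len/current_sent_index, in-place grow of the last accumulator) by a boundary-first decomposition: compute the list of run-start positions, pair them with run ends, and build the four outputs by independent comprehensions over those runs.
import Mathlib
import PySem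

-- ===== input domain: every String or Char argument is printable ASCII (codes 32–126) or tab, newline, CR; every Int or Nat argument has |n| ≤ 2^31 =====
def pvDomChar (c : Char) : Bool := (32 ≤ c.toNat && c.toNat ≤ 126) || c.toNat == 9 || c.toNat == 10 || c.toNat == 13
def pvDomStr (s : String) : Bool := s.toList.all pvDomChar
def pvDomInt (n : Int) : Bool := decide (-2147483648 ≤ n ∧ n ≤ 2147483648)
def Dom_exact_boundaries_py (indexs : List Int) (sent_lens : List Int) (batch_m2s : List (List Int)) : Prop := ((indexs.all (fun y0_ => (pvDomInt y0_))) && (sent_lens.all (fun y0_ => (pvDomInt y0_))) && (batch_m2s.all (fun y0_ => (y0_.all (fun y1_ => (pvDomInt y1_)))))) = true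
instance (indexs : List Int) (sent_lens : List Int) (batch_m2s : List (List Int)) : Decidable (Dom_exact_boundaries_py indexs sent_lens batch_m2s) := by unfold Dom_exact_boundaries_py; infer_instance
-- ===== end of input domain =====

-- B replaces A's single scan with carried run-state by a boundary-first decomposition
-- (run-start positions, then independent comprehensions per run); same O(n) cost.
-- Both A and B grow each run's first batch_m2s list in place via +=, so side effects match;
-- the theorems below are about the return value.


-- ===== PORT A =====
-- Literal port of A's loop: state = (current_len, current_sent_index, sent_lens_simple,
-- indexs_simple, batch_m2s_simple, ranges).  All list reads use List.getD; under
-- Pre_ every consulted index is in range and nonnegative, where getD is exact Python indexing.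
def exact_boundaries_py (indexs : List Int) (sent_lens : List Int) (batch_m2s : List (List Int)) : List Int × List Int × List Int × List (List Int) :=
  let init : Int × Int × List Int × List Int × List (List Int) × List Int :=
    (1, indexs.getD 0 0, [sent_lens.getD 0 0], [indexs.getD 0 0], [batch_m2s.getD 0 []], [])
  let st := (List.range' 1 (indexs.length - 1)).foldl
    (fun (st : Int × Int × List Int × List Int × List (List Int) × List Int) i =>
      let index := indexs.getD i 0
      if st.2.1 == index then
        (st.1 + 1, st.2.1, st.2.2.1, st.2.2.2.1,
          st.2.2.2.2.1.dropLast ++ [st.2.2.2.2.1.getLastD [] ++ batch_m2s.getD i []],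
          st.2.2.2.2.2)
      else
        (1, index, st.2.2.1 ++ [sent_lens.getD i 0], st.2.2.2.1 ++ [index],
          st.2.2.2.2.1 ++ [batch_m2s.getD i []], st.2.2.2.2.2 ++ [st.1]))
    init
  (st.2.2.2.2.2 ++ [st.1], st.2.2.1, st.2.2.2.1, st.2.2.2.2.1)

-- ===== PORT B =====
-- Literal port of Source B: run-start positions, run ends, then one map per output.
def exact_boundaries_py_alt (indexs : List Int) (sent_lens : List Int) (batch_m2s : List (List Int)) : List Int × List Int × List Int × List (List Int) :=
  let n := indexs.length
  let starts := (List.range n).filter (fun i => i == 0 || !(indexs.getD i 0 == indexs.getD (i - 1) 0))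
  let ends := starts.drop 1 ++ [n]
  let pairs := starts.zip ends
  let ranges := pairs.map (fun p => (p.2 : Int) - (p.1 : Int))
  let sent_lens_simple := starts.map (fun s => sent_lens.getD s 0)
  let indexs_simple := starts.map (fun s => indexs.getD s 0)
  let batch_m2s_simple := pairs.map (fun p =>
    (List.range' (p.1 + 1) (p.2 - (p.1 + 1))).foldl (fun acc j => acc ++ batch_m2s.getD j []) (batch_m2s.getD p.1 []))
  (ranges, sent_lens_simple, indexs_simple, batch_m2s_simple)

-- ===== PRECONDITION & SPEC =====
-- Pre_ is exactly A's non-raising domain: indexs nonempty (indexs[0]), batch_m2s read at every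
-- position of indexs, sent_lens read exactly at the run-start positions.
def Pre_exact_boundaries_py (indexs : List Int) (sent_lens : List Int) (batch_m2s : List (List Int)) : Prop :=
  indexs ≠ [] ∧ indexs.length ≤ batch_m2s.length ∧
    ∀ i ∈ List.range indexs.length,
      (i = 0 ∨ indexs.getD i 0 ≠ indexs.getD (i - 1) 0) → i < sent_lens.length
instance (indexs : List Int) (sent_lens : List Int) (batch_m2s : List (List Int)) : Decidable (Pre_exact_boundaries_py indexs sent_lens batch_m2s) := by unfold Pre_exact_boundaries_py; infer_instance
def pvWitness_exact_boundaries_py : List Int × List Int × List (List Int) :=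
  ([1, 1, 2], [4, 5, 6], [[1], [2], [3]])

def Spec_exact_boundaries_py (indexs : List Int) (sent_lens : List Int) (batch_m2s : List (List Int)) (out : List Int × List Int × List Int × List (List Int)) : Prop := out = exact_boundaries_py_alt indexs sent_lens batch_m2s
instance (indexs : List Int) (sent_lens : List Int) (batch_m2s : List (List Int)) (out : List Int × List Int × List Int × List (List Int)) : Decidable (Spec_exact_boundaries_py indexs sent_lens batch_m2s out) := by unfold Spec_exact_boundaries_py; infer_instance

-- ===== CLAIM (what is proved, stated in full; the proofs are below) =====
def Claim_equal_exact_boundaries_py : Prop := ∀ (indexs : List Int) (sent_lens : List Int) (batch_m2s : List (List Int)), Dom_exact_boundaries_py indexs sent_lens batch_m2s → Pre_exact_boundaries_py indexs sent_lens batch_m2s → Spec_exact_boundaries_py indexs sent_lens batch_m2s (exact_boundaries_py indexs sent_lens batch_m2s)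

-- ===== LEMMAS AND PROOFS =====

-- Proof-side names for the pieces of B's computation.
def pvStarts (l : List Int) : List Nat :=
  (List.range l.length).filter (fun i => i == 0 || !(l.getD i 0 == l.getD (i - 1) 0))

def pvPairs (l : List Int) : List (Nat × Nat) :=
  (pvStarts l).zip ((pvStarts l).drop 1 ++ [l.length])

def pvBm (bm : List (List Int)) (p : Nat × Nat) : List Int :=
  (List.range' (p.1 + 1) (p.2 - (p.1 + 1))).foldl (fun acc j => acc ++ bm.getD j []) (bm.getD p.1 [])

def pvRanges (l : List Int) : List Int :=
  (pvPairs l).map (fun p => (p.2 : Int) - (p.1 : Int))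

-- Proof-side name for A's fold.
def pvFoldA (indexs sent_lens : List Int) (batch_m2s : List (List Int)) :
    Int × Int × List Int × List Int × List (List Int) × List Int :=
  (List.range' 1 (indexs.length - 1)).foldl
    (fun (st : Int × Int × List Int × List Int × List (List Int) × List Int) i =>
      let index := indexs.getD i 0
      if st.2.1 == index then
        (st.1 + 1, st.2.1, st.2.2.1, st.2.2.2.1,
          st.2.2.2.2.1.dropLast ++ [st.2.2.2.2.1.getLastD [] ++ batch_m2s.getD i []],
          st.2.2.2.2.2)
      else
        (1, index, st.2.2.1 ++ [sent_lens.getD i 0], st.2.2.2.1 ++ [index],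
          st.2.2.2.2.1 ++ [batch_m2s.getD i []], st.2.2.2.2.2 ++ [st.1]))
    (1, indexs.getD 0 0, [sent_lens.getD 0 0], [indexs.getD 0 0], [batch_m2s.getD 0 []], [])

theorem portA_eq (indexs sent_lens : List Int) (batch_m2s : List (List Int)) :
    exact_boundaries_py indexs sent_lens batch_m2s =
      ((pvFoldA indexs sent_lens batch_m2s).2.2.2.2.2 ++ [(pvFoldA indexs sent_lens batch_m2s).1],
       (pvFoldA indexs sent_lens batch_m2s).2.2.1,
       (pvFoldA indexs sent_lens batch_m2s).2.2.2.1,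
       (pvFoldA indexs sent_lens batch_m2s).2.2.2.2.1) := rfl

theorem portB_eq (indexs sent_lens : List Int) (batch_m2s : List (List Int)) :
    exact_boundaries_py_alt indexs sent_lens batch_m2s =
      (pvRanges indexs,
       (pvStarts indexs).map (fun s => sent_lens.getD s 0),
       (pvStarts indexs).map (fun s => indexs.getD s 0),
       (pvPairs indexs).map (pvBm batch_m2s)) := rfl

theorem pvStarts_ne_nil (l : List Int) (h : l ≠ []) : pvStarts l ≠ [] := by
  have h0 : 0 ∈ pvStarts l := by
    unfold pvStarts
    simp [List.mem_filter, List.mem_range]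
    exact List.length_pos_of_ne_nil h
  intro hnil; rw [hnil] at h0; exact absurd h0 (List.not_mem_nil)

theorem getD_concat_length (l : List Int) (x d : Int) : (l ++ [x]).getD l.length d = x := by
  simp [List.getD_eq_getElem?_getD]

theorem getD_append_lt (l l' : List Int) (i : Nat) (d : Int) (h : i < l.length) :
    (l ++ l').getD i d = l.getD i d := by
  simp [List.getD_eq_getElem?_getD, List.getElem?_append_left h]

theorem getD_last (l : List Int) (d : Int) (h : l ≠ []) :
    l.getD (l.length - 1) d = l.getLastD d := by
  rcases List.eq_nil_or_concat l with rfl | ⟨ys, y, rfl⟩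
  · exact absurd rfl h
  · simp [List.getD_eq_getElem?_getD]

theorem pvStarts_concat (l : List Int) (x : Int) (h : l ≠ []) :
    pvStarts (l ++ [x]) =
      pvStarts l ++ (if x = l.getLastD 0 then [] else [l.length]) := by
  unfold pvStarts
  have hlen : (l ++ [x]).length = l.length + 1 := by simp
  rw [hlen, List.range_succ, List.filter_append]
  congr 1
  · apply List.filter_congr
    intro i hi
    have hi' : i < l.length := List.mem_range.mp hi
    by_cases h0 : i = 0
    · simp [h0]
    · have : i - 1 < l.length := by omega
      simp [List.getD_eq_getElem?_getD, List.getElem?_append_left hi',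
        List.getElem?_append_left this]
  · have hx : (l ++ [x]).getD l.length 0 = x := getD_concat_length l x 0
    have hprev : (l ++ [x]).getD (l.length - 1) 0 = l.getLastD 0 := by
      have hl1 : l.length - 1 < l.length := by
        have := List.length_pos_of_ne_nil h; omega
      rw [getD_append_lt _ _ _ _ hl1, getD_last l 0 h]
    have hne : l.length ≠ 0 := by
      have := List.length_pos_of_ne_nil h; omega
    have h1 : (l.length == 0) = false := by
      simp only [beq_eq_false_iff_ne, ne_eq]; exact hne
    by_cases hxe : x = l.getLastD 0
    · simp only [List.filter, hx, hprev]
      simp [h1, hxe, List.getLastD_eq_getLast?]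
    · simp only [List.filter, hx, hprev]
      simp only [List.getLastD_eq_getLast?] at hxe
      have h2 : (x == l.getLast?.getD 0) = false := by
        simp only [beq_eq_false_iff_ne, ne_eq]; exact hxe
      simp [h1, h2, hxe]

theorem zip_dropped (S : List Nat) (e : Nat) (h : S ≠ []) :
    S.zip (S.drop 1 ++ [e]) = (S.dropLast.zip (S.drop 1)) ++ [(S.getLastD 0, e)] := by
  have hlen : S.dropLast.length = (S.drop 1).length := by
    simp [List.length_dropLast]
  have hS : S.dropLast ++ [S.getLastD 0] = S := by
    rcases List.eq_nil_or_concat S with rfl | ⟨ys, y, rfl⟩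
    · exact absurd rfl h
    · simp [List.getLastD_eq_getLast?]
  calc S.zip (S.drop 1 ++ [e])
      = (S.dropLast ++ [S.getLastD 0]).zip (S.drop 1 ++ [e]) := by rw [hS]
    _ = S.dropLast.zip (S.drop 1) ++ ([S.getLastD 0].zip [e]) := List.zip_append hlen
    _ = (S.dropLast.zip (S.drop 1)) ++ [(S.getLastD 0, e)] := by simp

theorem pvPairs_eq (l : List Int) (h : l ≠ []) :
    pvPairs l = ((pvStarts l).dropLast.zip ((pvStarts l).drop 1)) ++
      [((pvStarts l).getLastD 0, l.length)] := by
  unfold pvPairs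
  exact zip_dropped _ _ (pvStarts_ne_nil l h)

theorem dropLast_concat_getLastD {α : Type} (xs : List α) (d : α) (h : xs ≠ []) :
    xs.dropLast ++ [xs.getLastD d] = xs := by
  rcases List.eq_nil_or_concat xs with rfl | ⟨ys, y, rfl⟩
  · exact absurd rfl h
  · simp [List.getLastD_eq_getLast?]

theorem pvFoldA_concat (sl : List Int) (bm : List (List Int)) (l : List Int) (x : Int)
    (h : l ≠ []) :
    pvFoldA (l ++ [x]) sl bm =
      (fun st : Int × Int × List Int × List Int × List (List Int) × List Int =>
        if st.2.1 == x then
          (st.1 + 1, st.2.1, st.2.2.1, st.2.2.2.1,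
            st.2.2.2.2.1.dropLast ++ [st.2.2.2.2.1.getLastD [] ++ bm.getD l.length []],
            st.2.2.2.2.2)
        else
          (1, x, st.2.2.1 ++ [sl.getD l.length 0], st.2.2.2.1 ++ [x],
            st.2.2.2.2.1 ++ [bm.getD l.length []], st.2.2.2.2.2 ++ [st.1]))
        (pvFoldA l sl bm) := by
  have hn : 1 ≤ l.length := List.length_pos_of_ne_nil h
  unfold pvFoldA
  have h1 : (l ++ [x]).length - 1 = (l.length - 1) + 1 := by
    simp only [List.length_append, List.length_cons, List.length_nil]; omega
  have h2 : 1 + 1 * (l.length - 1) = l.length := by omega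
  rw [h1, List.range'_concat, h2, List.foldl_append]
  have hgl : (l ++ [x]).getD l.length 0 = x := getD_concat_length l x 0
  have hfold :
      (List.range' 1 (l.length - 1)).foldl
        (fun (st : Int × Int × List Int × List Int × List (List Int) × List Int) i =>
          let index := (l ++ [x]).getD i 0
          if st.2.1 == index then
            (st.1 + 1, st.2.1, st.2.2.1, st.2.2.2.1,
              st.2.2.2.2.1.dropLast ++ [st.2.2.2.2.1.getLastD [] ++ bm.getD i []],
              st.2.2.2.2.2)
          else
            (1, index, st.2.2.1 ++ [sl.getD i 0], st.2.2.2.1 ++ [index],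
              st.2.2.2.2.1 ++ [bm.getD i []], st.2.2.2.2.2 ++ [st.1]))
        (1, (l ++ [x]).getD 0 0, [sl.getD 0 0], [(l ++ [x]).getD 0 0], [bm.getD 0 []], []) =
      (List.range' 1 (l.length - 1)).foldl
        (fun (st : Int × Int × List Int × List Int × List (List Int) × List Int) i =>
          let index := l.getD i 0
          if st.2.1 == index then
            (st.1 + 1, st.2.1, st.2.2.1, st.2.2.2.1,
              st.2.2.2.2.1.dropLast ++ [st.2.2.2.2.1.getLastD [] ++ bm.getD i []],
              st.2.2.2.2.2)
          else
            (1, index, st.2.2.1 ++ [sl.getD i 0], st.2.2.2.1 ++ [index],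
              st.2.2.2.2.1 ++ [bm.getD i []], st.2.2.2.2.2 ++ [st.1]))
        (1, l.getD 0 0, [sl.getD 0 0], [l.getD 0 0], [bm.getD 0 []], []) := by
    rw [getD_append_lt l [x] 0 0 hn]
    apply PySem.List.foldl_congr_mem
    intro acc i hi
    have hi' : i < l.length := by
      rcases List.mem_range'_1.mp hi with ⟨_, hlt⟩; omega
    simp only [getD_append_lt l [x] i 0 hi']
  rw [hfold]
  simp only [List.foldl_cons, List.foldl_nil, hgl]

theorem pvStarts_sub_range (l : List Int) : ∀ s ∈ pvStarts l, s < l.length := by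
  intro s hs
  unfold pvStarts at hs
  exact List.mem_range.mp (List.mem_filter.mp hs).1

theorem pvInvariant (sl : List Int) (bm : List (List Int)) :
    ∀ l : List Int, l ≠ [] →
      pvFoldA l sl bm = ((pvRanges l).getLastD 1, l.getLastD 0,
        (pvStarts l).map (fun s => sl.getD s 0),
        (pvStarts l).map (fun s => l.getD s 0),
        (pvPairs l).map (pvBm bm),
        (pvRanges l).dropLast) := by
  intro l
  induction l using List.reverseRecOn with
  | nil => intro h; exact absurd rfl h
  | append_singleton l x ih =>
    intro _
    rcases List.eq_nil_or_concat l with rfl | hne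
    · -- base case: [x]
      simp [pvFoldA, pvStarts, pvPairs, pvRanges, pvBm, List.range_one]
    · have hl : l ≠ [] := by rcases hne with ⟨ys, y, rfl⟩; simp
      have hS := pvStarts_ne_nil l hl
      have hsk : (pvStarts l).getLastD 0 < l.length := by
        apply pvStarts_sub_range
        rcases List.eq_nil_or_concat (pvStarts l) with h0 | ⟨zs, z, hz⟩
        · exact absurd h0 hS
        · rw [hz]; simp [List.getLastD_eq_getLast?]
      rw [pvFoldA_concat sl bm l x hl, ih hl]
      by_cases hx : x = l.getLastD 0
      · -- x continues the last run
        have hcond : (l.getLastD 0 == x) = true := by simp [hx]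
        have hstarts : pvStarts (l ++ [x]) = pvStarts l := by
          rw [pvStarts_concat l x hl, if_pos hx, List.append_nil]
        have hpairs : pvPairs (l ++ [x]) =
            ((pvStarts l).dropLast.zip ((pvStarts l).drop 1)) ++
              [((pvStarts l).getLastD 0, l.length + 1)] := by
          unfold pvPairs
          rw [hstarts]
          have : (l ++ [x]).length = l.length + 1 := by simp
          rw [this]
          exact zip_dropped _ _ hS
        have hpl := pvPairs_eq l hl
        simp only [hcond, if_true]
        refine congrArg₂ _ ?_ (congrArg₂ _ ?_ (congrArg₂ _ ?_ (congrArg₂ _ ?_ (congrArg₂ _ ?_ ?_))))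
        · -- current_len
          unfold pvRanges
          rw [hpairs, hpl]
          simp only [List.map_append, List.map_cons, List.map_nil]
          rw [List.getLastD_concat, List.getLastD_concat]
          push_cast; ring
        · -- current index
          simp [List.getLastD_eq_getLast?, hx]
        · -- sent_lens_simple
          rw [hstarts]
        · -- indexs_simple
          rw [hstarts]
          apply List.map_congr_left
          intro s hs
          exact (getD_append_lt l [x] s 0 (pvStarts_sub_range l s hs)).symm
        · -- batch_m2s_simple
          rw [hpairs, hpl]
          simp only [List.map_append, List.map_cons, List.map_nil]
          rw [List.dropLast_concat, List.getLastD_concat]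
          congr 1
          have hbm : pvBm bm ((pvStarts l).getLastD 0, l.length + 1) =
              pvBm bm ((pvStarts l).getLastD 0, l.length) ++ bm.getD l.length [] := by
            unfold pvBm
            have e1 : l.length + 1 - ((pvStarts l).getLastD 0 + 1) =
                (l.length - ((pvStarts l).getLastD 0 + 1)) + 1 := by omega
            have e2 : (pvStarts l).getLastD 0 + 1 +
                1 * (l.length - ((pvStarts l).getLastD 0 + 1)) = l.length := by omega
            rw [e1, List.range'_concat, e2, List.foldl_append]
            simp
          rw [hbm]
        · -- ranges (accumulated part)
          unfold pvRanges
          rw [hpairs, hpl]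
          simp only [List.map_append, List.map_cons, List.map_nil]
          rw [List.dropLast_concat, List.dropLast_concat]
      · -- x starts a new run
        have hcond : (l.getLastD 0 == x) = false := by
          simp only [beq_eq_false_iff_ne, ne_eq]
          intro hc; exact hx hc.symm
        have hstarts : pvStarts (l ++ [x]) = pvStarts l ++ [l.length] := by
          rw [pvStarts_concat l x hl, if_neg hx]
        have hpairs : pvPairs (l ++ [x]) = pvPairs l ++ [(l.length, l.length + 1)] := by
          unfold pvPairs
          rw [hstarts]
          have hd : (pvStarts l ++ [l.length]).drop 1 = (pvStarts l).drop 1 ++ [l.length] := by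
            rw [List.drop_append_of_le_length (List.length_pos_of_ne_nil hS)]
          have hlen2 : (l ++ [x]).length = l.length + 1 := by simp
          have hpos := List.length_pos_of_ne_nil hS
          rw [hd, hlen2,
            List.zip_append (l₁ := pvStarts l) (l₂ := (pvStarts l).drop 1 ++ [l.length])
              (by simp only [List.length_append, List.length_drop, List.length_cons,
                    List.length_nil]; omega)]
          simp
        simp only [hcond, Bool.false_eq_true, if_false]
        refine congrArg₂ _ ?_ (congrArg₂ _ ?_ (congrArg₂ _ ?_ (congrArg₂ _ ?_ (congrArg₂ _ ?_ ?_))))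
        · -- current_len = 1
          unfold pvRanges
          rw [hpairs]
          simp only [List.map_append, List.map_cons, List.map_nil]
          rw [List.getLastD_concat]
          push_cast; ring
        · simp [List.getLastD_eq_getLast?]
        · rw [hstarts, List.map_append]
          simp
        · rw [hstarts, List.map_append]
          simp only [List.map_cons, List.map_nil, getD_concat_length]
          congr 1
          apply List.map_congr_left
          intro s hs
          exact (getD_append_lt l [x] s 0 (pvStarts_sub_range l s hs)).symm
        · rw [hpairs, List.map_append]
          congr 1
          simp [pvBm]
        · -- ranges gains current_len
          unfold pvRanges
          rw [hpairs]
          simp only [List.map_append, List.map_cons, List.map_nil]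
          rw [List.dropLast_concat]
          have hr : pvRanges l ≠ [] := by
            unfold pvRanges
            rw [pvPairs_eq l hl]
            simp
          have := dropLast_concat_getLastD (pvRanges l) 1 hr
          unfold pvRanges at this
          rw [this]

theorem exact_boundaries_main : ∀ (indexs sent_lens : List Int) (batch_m2s : List (List Int)),
    indexs ≠ [] → exact_boundaries_py indexs sent_lens batch_m2s = exact_boundaries_py_alt indexs sent_lens batch_m2s := by
  intro l sl bm h
  rw [portA_eq, portB_eq, pvInvariant sl bm l h]
  have hr : pvRanges l ≠ [] := by
    unfold pvRanges
    rw [pvPairs_eq l h]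
    simp
  simp only
  rw [dropLast_concat_getLastD (pvRanges l) 1 hr]


-- ===== VERDICT (by name: the statement is the Claim_ definition above) =====
theorem exact_boundaries_py_spec : Claim_equal_exact_boundaries_py := by
  intro indexs sent_lens batch_m2s _ hpre
  exact exact_boundaries_main indexs sent_lens batch_m2s hpre.1
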